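-- pv_equiv track=rewrite | github.com/vin0010/Competitve-Programming | python/leetcode/TwoSum.py | get_count_map
-- ===== SOURCE A (Python) =====
-- def get_count_map(nums):
--     """
--     :rtype: dict
--     """
--     count_map = dict()
--     for i in range(0, len(nums)):
--         if nums[i] in count_map:
--             temp = count_map[nums[i]]
--             temp[1].append(i)
--             temp = (temp[0]+1, temp[1])
--             count_map[nums[i]] = temp
--         else:
--             count_map[nums[i]] = (1, [i])
--     return count_map
-- ===== SOURCE B (Python) =====
-- def get_count_map(nums):
--     result = {}
--     remaining = list(enumerate(nums))
--     while remaining: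
--         v = remaining[0][1]
--         idx = [i for i, x in remaining if x == v]
--         result[v] = (len(idx), idx)
--         remaining = [(i, x) for i, x in remaining if x != v]
--     return result
-- ===== Notes on version B (the rewrite author's own statement) =====
-- stated objective: alternative
-- what changed: B repeatedly partitions the remaining (index, value) pairs by the first value, emitting each distinct value's complete (count, index-list) entry in one stroke, instead of A's single pass that updates a running (count, indices) tuple in the dict at every element.
import Mathlib
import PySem

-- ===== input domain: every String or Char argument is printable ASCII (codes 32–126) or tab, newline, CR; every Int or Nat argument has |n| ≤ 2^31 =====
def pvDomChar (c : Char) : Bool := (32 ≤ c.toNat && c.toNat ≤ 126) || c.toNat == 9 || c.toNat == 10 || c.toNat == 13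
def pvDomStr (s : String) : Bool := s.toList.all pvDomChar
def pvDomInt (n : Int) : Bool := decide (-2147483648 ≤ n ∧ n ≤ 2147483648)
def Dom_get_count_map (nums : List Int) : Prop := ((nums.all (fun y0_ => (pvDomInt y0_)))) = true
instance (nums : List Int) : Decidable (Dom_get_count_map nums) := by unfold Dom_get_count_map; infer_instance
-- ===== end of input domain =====

-- B repeatedly partitions the remaining (index, value) pairs by the first value, emitting each distinct value's whole (count, indices) entry at once, instead of A's single pass updating a running tuple per element; objective: alternative.


-- ===== PORT A =====
def get_count_map (nums : List Int) : List (Int × Int × List Int) :=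
  let count_map : PySem.Dict Int (Int × List Int) :=
    (PySem.List.pyRange 0 (nums.length : Int) 1).foldl (fun count_map i =>
      let x := PySem.List.pyGetD nums i 0
      if count_map.contains x then
        let temp := count_map.getD x (0, [])
        let temp2 := (temp.1 + 1, temp.2 ++ [i])
        count_map.insert x temp2
      else
        count_map.insert x (1, [i])) PySem.Dict.empty
  count_map.items

-- ===== PORT B =====
-- while remaining: take the first value, collect all its indices, drop its pairs
def pvAltLoop (remaining : List (Int × Int)) (result : PySem.Dict Int (Int × List Int)) :
    PySem.Dict Int (Int × List Int) :=
  match remaining with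
  | [] => result
  | q :: rest =>
    let v := q.2
    let idx := ((q :: rest).filter (fun p => p.2 == v)).map (·.1)
    pvAltLoop ((q :: rest).filter (fun p => !(p.2 == v)))
      (result.insert v ((idx.length : Int), idx))
termination_by remaining.length
decreasing_by
  simp only [List.filter_cons, BEq.rfl, Bool.not_true]
  exact Nat.lt_succ_of_le (List.length_filter_le _ _)

def get_count_map_alt (nums : List Int) : List (Int × Int × List Int) :=
  (pvAltLoop (PySem.List.enumerate nums 0) PySem.Dict.empty).items

-- ===== PRECONDITION & SPEC =====
def Spec_get_count_map (nums : List Int) (out : List (Int × Int × List Int)) : Prop := out = get_count_map_alt nums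
instance (nums : List Int) (out : List (Int × Int × List Int)) : Decidable (Spec_get_count_map nums out) := by unfold Spec_get_count_map; infer_instance

-- ===== CLAIM (what is proved, stated in full; the proofs are below) =====
def Claim_equal_get_count_map : Prop := ∀ (nums : List Int), Dom_get_count_map nums → Spec_get_count_map nums (get_count_map nums)

-- ===== LEMMAS AND PROOFS =====

-- first-occurrence list of distinct values
def pvFo (l : List Int) : List Int :=
  match l with
  | [] => []
  | v :: l => v :: pvFo (l.filter (fun x => !(x == v)))
termination_by l.length
decreasing_by
  calc (List.filter _ l.attach).unattach.length ≤ l.attach.length := by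
        rw [List.length_unattach]; exact List.length_filter_le _ _
    _ < (v :: l).length := by simp

-- the entry a finished run of either program stores for value v, given the enumerate pairs
def pvEnt (v : Int) (ps : List (Int × Int)) : Int × List Int :=
  let idx := (ps.filter (fun q => q.2 == v)).map (·.1)
  ((idx.length : Int), idx)

-- canonical items list: first-occurrence values, each with its full entry
def pvCanon (ps : List (Int × Int)) : List (Int × Int × List Int) :=
  (pvFo (ps.map (·.2))).map (fun v => (v, pvEnt v ps))

theorem pv_mem_fo (x : Int) : ∀ (l : List Int), x ∈ pvFo l ↔ x ∈ l := by
  intro l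
  induction l using pvFo.induct with
  | case1 => simp [pvFo]
  | case2 v l ih =>
    simp only [List.unattach_filter, List.unattach_attach] at ih
    rw [pvFo]
    simp only [List.mem_cons, ih, List.mem_filter]
    by_cases hx : x = v
    · simp [hx]
    · simp [hx]

theorem pv_fo_nodup : ∀ (l : List Int), (pvFo l).Nodup := by
  intro l
  induction l using pvFo.induct with
  | case1 => simp [pvFo]
  | case2 v l ih =>
    simp only [List.unattach_filter, List.unattach_attach] at ih
    rw [pvFo]
    refine List.nodup_cons.mpr ⟨?_, ih⟩
    rw [pv_mem_fo]
    simp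

theorem pv_fo_snoc (x : Int) : ∀ (l : List Int),
    pvFo (l ++ [x]) = if x ∈ l then pvFo l else pvFo l ++ [x] := by
  intro l
  induction l using pvFo.induct with
  | case1 => simp [pvFo]
  | case2 v l ih =>
    simp only [List.unattach_filter, List.unattach_attach] at ih
    by_cases hx : x = v
    · subst hx
      have h1 : (l ++ [x]).filter (fun y => !(y == x)) = l.filter (fun y => !(y == x)) := by
        simp [List.filter_append]
      rw [List.cons_append, pvFo, h1]
      conv_rhs => rw [pvFo]
      simp
    · have h1 : (l ++ [x]).filter (fun y => !(y == v)) = l.filter (fun y => !(y == v)) ++ [x] := by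
        simp [List.filter_append, hx]
      rw [List.cons_append, pvFo, h1, ih]
      have hmem : x ∈ l.filter (fun y => !(y == v)) ↔ x ∈ l := by
        simp [List.mem_filter, hx]
      by_cases h : x ∈ l
      · simp [hmem, h, pvFo, hx]
      · simp [hmem, h, pvFo, hx]

-- A's index loop over range(0, len(nums)) reads nums[i]; rewritten as a fold over enumerate
theorem pv_foldl_pyRange_eq_enumerate {σ : Type} (f : σ → Int → Int → σ) :
    ∀ (xs nums : List Int) (s : Nat), nums.drop s = xs → ∀ (init : σ),
      (PySem.List.pyRange (s : Int) (nums.length : Int) 1).foldl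
        (fun b i => f b i (PySem.List.pyGetD nums i 0)) init
      = (PySem.List.enumerate xs (s : Int)).foldl (fun b p => f b p.1 p.2) init := by
  intro xs
  induction xs with
  | nil =>
    intro nums s h init
    have hlen : nums.length ≤ s := by
      have := List.drop_eq_nil_iff.mp h
      omega
    rw [PySem.List.pyRange_one_eq_nil (by exact_mod_cast hlen)]
    simp [PySem.List.enumerate]
  | cons x xs ih =>
    intro nums s h init
    have hs : s < nums.length := by
      by_contra hge
      rw [List.drop_eq_nil_iff.mpr (by omega)] at h
      simp at h
    have hget : PySem.List.pyGetD nums (s : Int) 0 = x := by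
      rw [PySem.List.pyGetD_natCast]
      have h0 : (nums.drop s).getD 0 0 = x := by rw [h]; rfl
      rwa [List.getD, List.getElem?_drop, Nat.add_zero] at h0
    rw [PySem.List.pyRange_one_cons (by exact_mod_cast hs), List.foldl_cons, hget,
      PySem.List.enumerate_cons, List.foldl_cons]
    have hdrop : nums.drop (s + 1) = xs := by
      have : nums.drop (s + 1) = (nums.drop s).drop 1 := by
        rw [List.drop_drop]
      rw [this, h]; rfl
    have := ih nums (s + 1) hdrop (f init (s : Int) x)
    rw [show ((s : Int) + 1) = ((s + 1 : Nat) : Int) by push_cast; ring]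
    exact this

-- pvEnt after appending one pair
theorem pv_ent_snoc (v : Int) (done : List (Int × Int)) (i x : Int) :
    pvEnt v (done ++ [(i, x)])
      = if x == v then ((pvEnt v done).1 + 1, (pvEnt v done).2 ++ [i]) else pvEnt v done := by
  by_cases h : x = v
  · subst h
    simp [pvEnt, List.filter_append]
  · simp [pvEnt, List.filter_append, h]

theorem pv_contains_canon (done : List (Int × Int)) (x : Int) :
    ((PySem.Dict.mk (pvCanon done)).contains x = true) ↔ x ∈ done.map (·.2) := by
  simp [PySem.Dict.contains_mk, pvCanon, List.any_map, List.any_eq_true, Function.comp,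
    pv_mem_fo]

theorem pv_getD_canon (done : List (Int × Int)) (x : Int) (h : x ∈ done.map (·.2)) :
    (PySem.Dict.mk (pvCanon done)).getD x (0, []) = pvEnt x done := by
  apply PySem.Dict.getD_of_mem_items
  · exact List.mem_map_of_mem ((pv_mem_fo x _).mpr h)
  · show (List.map _ (pvCanon done)).Nodup
    simp only [pvCanon, List.map_map]
    have : ((fun p : Int × Int × List Int => p.1) ∘ fun v => (v, pvEnt v done)) = id := rfl
    rw [this, List.map_id]
    exact pv_fo_nodup _

-- map snd of the pairs, with one pair appended
theorem pv_map_snd_snoc (done : List (Int × Int)) (i x : Int) :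
    (done ++ [(i, x)]).map (·.2) = done.map (·.2) ++ [x] := by
  simp

-- one A-step from the canonical dict of `done` yields the canonical dict of `done ++ [(i, x)]`
theorem pv_A_step (done : List (Int × Int)) (i x : Int) :
    (if (PySem.Dict.mk (pvCanon done)).contains x then
       (PySem.Dict.mk (pvCanon done)).insert x
         (((PySem.Dict.mk (pvCanon done)).getD x (0, [])).1 + 1,
          ((PySem.Dict.mk (pvCanon done)).getD x (0, [])).2 ++ [i])
     else (PySem.Dict.mk (pvCanon done)).insert x (1, [i]))
    = PySem.Dict.mk (pvCanon (done ++ [(i, x)])) := by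
  apply PySem.Dict.ext
  by_cases hx : x ∈ done.map (·.2)
  · have hc : (PySem.Dict.mk (pvCanon done)).contains x = true := (pv_contains_canon done x).mpr hx
    rw [if_pos hc, PySem.Dict.items_insert_of_contains _ _ hc, pv_getD_canon done x hx]
    show _ = pvCanon (done ++ [(i, x)])
    unfold pvCanon
    rw [pv_map_snd_snoc, pv_fo_snoc, if_pos hx, List.map_map]
    apply List.map_congr_left
    intro v _
    simp only [Function.comp_apply]
    rw [pv_ent_snoc]
    by_cases hvx : v = x
    · subst hvx; simp
    · have h1 : (v == x) = false := by simp [hvx]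
      have h2 : (x == v) = false := by simp [Ne.symm hvx]
      simp [h1, h2]
  · have hc : (PySem.Dict.mk (pvCanon done)).contains x = false := by
      rw [← Bool.not_eq_true, pv_contains_canon]; exact hx
    rw [if_neg (by simp [hc]), PySem.Dict.items_insert_of_not_contains _ _ hc]
    show pvCanon done ++ _ = pvCanon (done ++ [(i, x)])
    unfold pvCanon
    rw [pv_map_snd_snoc, pv_fo_snoc, if_neg hx, List.map_append]
    congr 1
    · apply List.map_congr_left
      intro v hv
      have hvl : v ∈ done.map (·.2) := (pv_mem_fo v _).mp hv
      have hvx : x ≠ v := fun h => hx (h ▸ hvl)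
      rw [pv_ent_snoc]
      simp [hvx]
    · have hnil : done.filter (fun q => q.2 == x) = [] := by
        rw [List.filter_eq_nil_iff]
        intro q hq
        simp only [beq_iff_eq]
        intro hqx
        exact hx (hqx ▸ List.mem_map_of_mem hq)
      rw [List.map_cons, List.map_nil, pv_ent_snoc]
      simp [pvEnt, hnil]

theorem pv_A_fold : ∀ (ps done : List (Int × Int)),
    (ps.foldl (fun d p =>
        if d.contains p.2 then
          d.insert p.2 ((d.getD p.2 (0, [])).1 + 1, (d.getD p.2 (0, [])).2 ++ [p.1])
        else d.insert p.2 (1, [p.1])) (PySem.Dict.mk (pvCanon done)))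
    = PySem.Dict.mk (pvCanon (done ++ ps)) := by
  intro ps
  induction ps with
  | nil => intro done; simp
  | cons p ps ih =>
    intro done
    rw [List.foldl_cons, pv_A_step done p.1 p.2, ih (done ++ [(p.1, p.2)])]
    simp

theorem pv_canon_cons (q : Int × Int) (rest : List (Int × Int)) :
    pvCanon (q :: rest)
      = (q.2, pvEnt q.2 (q :: rest))
        :: pvCanon ((q :: rest).filter (fun p => !(p.2 == q.2))) := by
  unfold pvCanon
  rw [List.map_cons, pvFo, List.map_cons]
  congr 1
  have hsnd : ((q :: rest).filter (fun p => !(p.2 == q.2))).map (·.2)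
      = (rest.map (·.2)).filter (fun x => !(x == q.2)) := by
    rw [List.filter_cons]
    simp only [BEq.rfl, Bool.not_true, Bool.false_eq_true, if_false]
    rw [List.filter_map]
    rfl
  rw [hsnd]
  apply List.map_congr_left
  intro w hw
  have hwmem : w ∈ (rest.map (·.2)).filter (fun x => !(x == q.2)) := (pv_mem_fo w _).mp hw
  have hwne : w ≠ q.2 := by
    have := (List.mem_filter.mp hwmem).2
    simpa using this
  congr 1
  unfold pvEnt
  have : ((q :: rest).filter (fun p => !(p.2 == q.2))).filter (fun p => p.2 == w)
      = (q :: rest).filter (fun p => p.2 == w) := by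
    rw [List.filter_filter]
    apply List.filter_congr
    intro p _
    by_cases hp : p.2 = w
    · simp [hp, hwne]
    · simp [hp]
  rw [this]

-- B's partition loop appends exactly the canonical items, as long as its keys are fresh
theorem pv_B_loop : ∀ (ps : List (Int × Int)) (d : PySem.Dict Int (Int × List Int)),
    (∀ w ∈ ps.map (·.2), d.contains w = false) →
    (pvAltLoop ps d).items = d.items ++ pvCanon ps := by
  intro ps d
  induction ps, d using pvAltLoop.induct with
  | case1 d =>
    intro _
    simp [pvAltLoop, pvCanon, pvFo]
  | case2 d q rest v idx ih =>
    intro h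
    have hvfresh : d.contains q.2 = false := h q.2 (by simp)
    rw [pvAltLoop]
    rw [ih ?fresh]
    case fresh =>
      intro w hw
      obtain ⟨p, hp, hpw⟩ := List.mem_map.mp hw
      have hpmem := List.mem_filter.mp hp
      have hwne : w ≠ q.2 := by
        have h2 := hpmem.2
        rw [hpw] at h2
        simpa using h2
      rw [PySem.Dict.contains_insert]
      have hdw : d.contains w = false := h w (hpw ▸ List.mem_map_of_mem hpmem.1)
      simp only [v] at hwne ⊢
      simp [hwne, hdw]
    rw [PySem.Dict.items_insert_of_not_contains _ _ hvfresh, pv_canon_cons]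
    simp
    refine ⟨rfl, ?_⟩
    congr 1
    rw [List.filter_cons]
    simp only [v]
    simp

-- ===== VERDICT (by name: the statement is the Claim_ definition above) =====
theorem pv_canon_nil : pvCanon ([] : List (Int × Int)) = [] := by
  simp [pvCanon, pvFo]

theorem pv_empty_eq_mk :
    (PySem.Dict.empty : PySem.Dict Int (Int × List Int)) = PySem.Dict.mk (pvCanon []) := by
  apply PySem.Dict.ext
  rw [pv_canon_nil]
  rfl

theorem get_count_map_spec : Claim_equal_get_count_map := by
  unfold Claim_equal_get_count_map
  intro nums _
  unfold Spec_get_count_map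
  have h1 := pv_foldl_pyRange_eq_enumerate (σ := PySem.Dict Int (Int × List Int))
    (fun d i x => if d.contains x then
        d.insert x ((d.getD x (0, [])).1 + 1, (d.getD x (0, [])).2 ++ [i])
      else d.insert x (1, [i])) nums nums 0 rfl PySem.Dict.empty
  have h2 : ((PySem.List.enumerate nums ((0 : Nat) : Int)).foldl (fun d p =>
      if d.contains p.2 then
        d.insert p.2 ((d.getD p.2 (0, [])).1 + 1, (d.getD p.2 (0, [])).2 ++ [p.1])
      else d.insert p.2 (1, [p.1])) PySem.Dict.empty)
      = PySem.Dict.mk (pvCanon (PySem.List.enumerate nums ((0 : Nat) : Int))) := by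
    rw [pv_empty_eq_mk]
    simpa using pv_A_fold (PySem.List.enumerate nums ((0 : Nat) : Int)) []
  have hA : get_count_map nums = pvCanon (PySem.List.enumerate nums ((0 : Nat) : Int)) :=
    (congrArg PySem.Dict.items h1).trans (congrArg PySem.Dict.items h2)
  have hB : get_count_map_alt nums = pvCanon (PySem.List.enumerate nums ((0 : Nat) : Int)) := by
    show (pvAltLoop (PySem.List.enumerate nums 0) PySem.Dict.empty).items = _
    rw [pv_B_loop _ _ (by intro w _; exact PySem.Dict.contains_empty w)]
    rfl
  rw [hA]
  exact hB.symm
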